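-- pv_equiv track=rewrite | github.com/apalmk/SLAC | backend/array_processing_tc2.py | find_emo_count
-- ===== SOURCE A (Python) =====
-- from collections import Counter
--
-- def find_emo_count(value):
--     neutral=0
--     angry=0
--     disgust=0
--     happy=0
--     surprise=0
--     yawn=0
--     absent=0
--     counter=Counter(value)
--     ce=counter.most_common()
--     for k in ce:
--         if k[0]==-1:
--             absent=k[1]
--         elif k[0]==0:
--             neutral=k[1]
--         elif k[0]==1:
--             angry=k[1]
--         elif k[0]==2:
--             disgust=k[1]
--         elif k[0]==3:
--             happy=k[1]
--         elif k[0]==4: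
--             surprise=k[1]
--         elif k[0]==5:
--             yawn=k[1]
--
--     return absent,neutral,angry,disgust,happy,surprise,yawn
-- ===== SOURCE B (Python) =====
-- def find_emo_count(value):
--     # sort, compress into runs of (code, run_length), then read the 7 fixed slots
--     runs = []
--     for v in sorted(value):
--         if runs and runs[-1][0] == v:
--             runs[-1] = (v, runs[-1][1] + 1)
--         else:
--             runs.append((v, 1))
--
--     def get(c):
--         for k, n in runs:
--             if k == c:
--                 return n
--         return 0
--
--     return (get(-1), get(0), get(1), get(2), get(3), get(4), get(5))
-- ===== Notes on version B (the rewrite author's own statement) =====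
-- stated objective: alternative
-- what changed: Replaces the hash-based frequency table (Counter + most_common + seven-way elif dispatch) with comparison-based grouping: sort the values, run-length-encode consecutive equal elements, and read the seven fixed codes out of the run list.
import Mathlib
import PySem

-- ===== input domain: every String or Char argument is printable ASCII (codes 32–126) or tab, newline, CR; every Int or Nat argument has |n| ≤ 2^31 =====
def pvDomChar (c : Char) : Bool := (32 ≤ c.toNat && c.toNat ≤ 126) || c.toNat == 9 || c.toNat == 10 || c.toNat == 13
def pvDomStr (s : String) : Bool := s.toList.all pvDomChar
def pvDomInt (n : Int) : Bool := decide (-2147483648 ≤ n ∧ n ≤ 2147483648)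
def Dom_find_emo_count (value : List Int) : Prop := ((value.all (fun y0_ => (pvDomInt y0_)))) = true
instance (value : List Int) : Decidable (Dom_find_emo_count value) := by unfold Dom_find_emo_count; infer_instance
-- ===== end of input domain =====

-- B replaces the hash frequency table + branch ladder by sort, run-length encoding, and slot lookup (alternative decomposition, not claimed faster).

-- ===== PORT A =====
-- the body of A's for-loop: the elif ladder updating the seven named counters
def pvLadder (st : Int × Int × Int × Int × Int × Int × Int) (k : Int × Int) :
    Int × Int × Int × Int × Int × Int × Int :=
  let (absent, neutral, angry, disgust, happy, surprise, yawn) := st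
  if k.1 = -1 then (k.2, neutral, angry, disgust, happy, surprise, yawn)
  else if k.1 = 0 then (absent, k.2, angry, disgust, happy, surprise, yawn)
  else if k.1 = 1 then (absent, neutral, k.2, disgust, happy, surprise, yawn)
  else if k.1 = 2 then (absent, neutral, angry, k.2, happy, surprise, yawn)
  else if k.1 = 3 then (absent, neutral, angry, disgust, k.2, surprise, yawn)
  else if k.1 = 4 then (absent, neutral, angry, disgust, happy, k.2, yawn)
  else if k.1 = 5 then (absent, neutral, angry, disgust, happy, surprise, k.2)
  else (absent, neutral, angry, disgust, happy, surprise, yawn)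

def find_emo_count (value : List Int) : Int × Int × Int × Int × Int × Int × Int :=
  let counter := PySem.Dict.counter value
  -- Counter.most_common() = sorted(items, key=itemgetter(1), reverse=True)
  let ce := PySem.List.sorted counter.items (fun p => p.2) true
  ce.foldl pvLadder (0, 0, 0, 0, 0, 0, 0)

-- ===== PORT B =====
-- one iteration of B's run-building loop: extend the last run or start a new one
def pvStep (runs : List (Int × Int)) (v : Int) : List (Int × Int) :=
  match runs.getLast? with
  | some last => if last.1 = v then runs.dropLast ++ [(v, last.2 + 1)] else runs ++ [(v, 1)]
  | none => runs ++ [(v, 1)]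

-- B's inner 'get': first run with key c, else 0
def pvGet (runs : List (Int × Int)) (c : Int) : Int :=
  match runs with
  | [] => 0
  | (k, n) :: rest => if k = c then n else pvGet rest c

def find_emo_count_alt (value : List Int) : Int × Int × Int × Int × Int × Int × Int :=
  let runs := (PySem.List.sorted value (fun x => x) false).foldl pvStep []
  (pvGet runs (-1), pvGet runs 0, pvGet runs 1, pvGet runs 2, pvGet runs 3,
   pvGet runs 4, pvGet runs 5)

-- ===== PRECONDITION & SPEC =====
def Spec_find_emo_count (value : List Int) (out : Int × Int × Int × Int × Int × Int × Int) : Prop := out = find_emo_count_alt value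
instance (value : List Int) (out : Int × Int × Int × Int × Int × Int × Int) : Decidable (Spec_find_emo_count value out) := by unfold Spec_find_emo_count; infer_instance

-- ===== CLAIM (what is proved, stated in full; the proofs are below) =====
def Claim_equal_find_emo_count : Prop := ∀ (value : List Int), Dom_find_emo_count value → Spec_find_emo_count value (find_emo_count value)

-- ===== LEMMAS AND PROOFS =====

-- one step of A's loop, written componentwise
theorem pvLadder_eq (a : Int × Int × Int × Int × Int × Int × Int) (p : Int × Int) :
    pvLadder a p =
      ((if p.1 = -1 then p.2 else a.1), (if p.1 = 0 then p.2 else a.2.1),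
       (if p.1 = 1 then p.2 else a.2.2.1), (if p.1 = 2 then p.2 else a.2.2.2.1),
       (if p.1 = 3 then p.2 else a.2.2.2.2.1), (if p.1 = 4 then p.2 else a.2.2.2.2.2.1),
       (if p.1 = 5 then p.2 else a.2.2.2.2.2.2)) := by
  obtain ⟨a1, a2, a3, a4, a5, a6, a7⟩ := a
  simp only [pvLadder]
  split_ifs <;> first | rfl | omega

-- the single-slot fold A's loop maintains in each of the seven variables
def pvSlot (c : Int) (ce : List (Int × Int)) (x : Int) : Int :=
  ce.foldl (fun acc q => if q.1 = c then q.2 else acc) x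

-- the whole fold is the tuple of its seven slot folds
theorem pv_decomp : ∀ (ce : List (Int × Int)) (a : Int × Int × Int × Int × Int × Int × Int),
    ce.foldl pvLadder a =
      (pvSlot (-1) ce a.1, pvSlot 0 ce a.2.1, pvSlot 1 ce a.2.2.1, pvSlot 2 ce a.2.2.2.1,
       pvSlot 3 ce a.2.2.2.2.1, pvSlot 4 ce a.2.2.2.2.2.1, pvSlot 5 ce a.2.2.2.2.2.2)
  | [], _ => rfl
  | p :: rest, a => by
    rw [List.foldl_cons, pvLadder_eq, pv_decomp rest]
    rfl

-- a slot fold over pairs whose c-keyed values all equal v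
theorem pvSlot_eq (c v : Int) : ∀ (ce : List (Int × Int)) (x : Int),
    (∀ p ∈ ce, p.1 = c → p.2 = v) →
    pvSlot c ce x = if c ∈ ce.map Prod.fst then v else x
  | [], x, _ => by simp [pvSlot]
  | p :: rest, x, hv => by
    have hrest : ∀ q ∈ rest, q.1 = c → q.2 = v := fun q hq => hv q (List.mem_cons_of_mem p hq)
    by_cases h : p.1 = c
    · have hpv : p.2 = v := hv p List.mem_cons_self h
      show pvSlot c rest (if p.1 = c then p.2 else x) = _
      rw [if_pos h, hpv, pvSlot_eq c v rest v hrest, ite_self,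
        if_pos (show c ∈ List.map Prod.fst (p :: rest) by
          rw [List.map_cons]; exact List.mem_cons.mpr (Or.inl h.symm))]
    · show pvSlot c rest (if p.1 = c then p.2 else x) = _
      rw [if_neg h, pvSlot_eq c v rest x hrest]
      by_cases hm : c ∈ rest.map Prod.fst
      · rw [if_pos hm, if_pos (by rw [List.map_cons]; exact List.mem_cons_of_mem _ hm)]
      · rw [if_neg hm, if_neg (by
          rw [List.map_cons, List.mem_cons]
          rintro (he | hmem)
          · exact h he.symm
          · exact hm hmem)]

-- each slot of A's fold ends up at the count of its category
theorem pv_slot_count (value : List Int) (ce : List (Int × Int))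
    (hperm : ce.Perm (PySem.Dict.counter value).items) (c : Int) :
    pvSlot c ce 0 = (value.count c : Int) := by
  have hv : ∀ p ∈ ce, p.1 = c → p.2 = (value.count c : Int) := by
    intro p hp hc
    have hmem : p ∈ (PySem.Dict.counter value).items := hperm.mem_iff.mp hp
    rw [PySem.Dict.items_counter] at hmem
    obtain ⟨k, _, rfl⟩ := List.mem_map.mp hmem
    simp only at hc
    rw [hc]
  rw [pvSlot_eq c _ ce 0 hv]
  by_cases hm : c ∈ ce.map Prod.fst
  · rw [if_pos hm]
  · rw [if_neg hm]
    have hcm : c ∉ value := by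
      intro hc
      apply hm
      have : (c, (value.count c : Int)) ∈ ce := by
        rw [hperm.mem_iff, PySem.Dict.items_counter]
        exact List.mem_map.mpr ⟨c, (PySem.Set.mem_ofList _ _).mpr hc, rfl⟩
      exact List.mem_map.mpr ⟨_, this, rfl⟩
    rw [List.count_eq_zero.mpr hcm]
    rfl

-- B-side lemmas --------------------------------------------------------------

-- first-match lookup distributes over append
theorem pvGet_append : ∀ (l l' : List (Int × Int)) (c : Int),
    pvGet (l ++ l') c = if c ∈ l.map Prod.fst then pvGet l c else pvGet l' c
  | [], l', c => by simp
  | (k, n) :: rest, l', c => by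
    by_cases h : k = c
    · simp [pvGet, h]
    · have h' : ¬ c = k := fun he => h he.symm
      have hmc : (c ∈ k :: rest.map Prod.fst) = (c ∈ rest.map Prod.fst) := by
        simp [List.mem_cons, h']
      simp only [List.cons_append, List.map_cons, hmc]
      show (if k = c then n else pvGet (rest ++ l') c) = _
      rw [if_neg h, pvGet_append rest l' c]
      simp [pvGet, h]

-- in a ≤-sorted list every element is at most the last
theorem pv_le_getLast : ∀ (s : List Int), s.Pairwise (· ≤ ·) →
    ∀ x ∈ s, ∀ (h : s ≠ []), x ≤ s.getLast h
  | [], _, x, hx, h => absurd rfl h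
  | [a], _, x, hx, h => by
    simp at hx; subst hx; rfl
  | a :: b :: t, hp, x, hx, h => by
    rcases List.pairwise_cons.mp hp with ⟨ha, hrest⟩
    rw [List.getLast_cons (by simp : (b :: t) ≠ [])]
    rcases List.mem_cons.mp hx with rfl | hx'
    · exact ha _ (List.getLast_mem (by simp))
    · exact pv_le_getLast (b :: t) hrest x hx' (by simp)

-- counting in a list extended by one element
theorem pv_count_snoc (l : List Int) (v c : Int) :
    ((l ++ [v]).count c : Int) = (l.count c : Int) + (if v = c then 1 else 0) := by
  by_cases h : v = c <;> simp [List.count_append, h]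

-- the invariant of B's run-building loop over a ≤-sorted input
theorem pv_rle_inv : ∀ (s : List Int), s.Pairwise (· ≤ ·) →
    (((s.foldl pvStep []).map Prod.fst).Nodup ∧
     (∀ k, k ∈ (s.foldl pvStep []).map Prod.fst ↔ k ∈ s) ∧
     ((s.foldl pvStep []).map Prod.fst).getLast? = s.getLast? ∧
     (∀ c, pvGet (s.foldl pvStep []) c = (s.count c : Int))) := by
  intro s
  induction s using List.reverseRecOn with
  | nil => exact fun _ => ⟨by simp, by simp, by simp, by intro c; simp [pvGet]⟩
  | append_singleton init v ih =>
    intro hp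
    rcases List.pairwise_append.mp hp with ⟨hinit, _, hle⟩
    have hle' : ∀ x ∈ init, x ≤ v := fun x hx => hle x hx v (by simp)
    obtain ⟨hnd, hmem, hlast, hget⟩ := ih hinit
    have hfold : (init ++ [v]).foldl pvStep [] = pvStep (init.foldl pvStep []) v := by
      simp [List.foldl_append]
    rcases List.eq_nil_or_concat' (init.foldl pvStep []) with hr | ⟨r₀, ⟨k, n⟩, hr⟩
    · -- no runs yet: init must be empty
      have hinit_nil : init = [] := by
        by_contra hne
        obtain ⟨a, ha⟩ := List.exists_mem_of_ne_nil init hne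
        have : a ∈ (init.foldl pvStep []).map Prod.fst := (hmem a).mpr ha
        rw [hr] at this; cases this
      subst hinit_nil
      refine ⟨by simp [pvStep], by simp [pvStep], by simp [pvStep], ?_⟩
      intro c
      by_cases h : v = c
      · subst h; simp [pvStep, pvGet]
      · have h' : ¬ c = v := fun he => h he.symm
        simp [pvStep, pvGet, h]
    · -- at least one run; its key k is the last element of init
      have hlastk : init.getLast? = some k := by
        rw [← hlast, hr]; simp
      have hinit_ne : init ≠ [] := by
        intro h; rw [h] at hlastk; cases hlastk
      have hlk : init.getLast hinit_ne = k := by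
        have h1 := List.getLast?_eq_some_getLast hinit_ne
        rw [hlastk] at h1
        exact (Option.some_injective _ h1).symm
      have hk_mem : k ∈ init := hlk ▸ List.getLast_mem hinit_ne
      have hkv : k ≤ v := hle' k hk_mem
      have hstep : pvStep (init.foldl pvStep []) v =
          if k = v then r₀ ++ [(v, n + 1)] else (init.foldl pvStep []) ++ [(v, 1)] := by
        rw [hr]; simp [pvStep]
      have holdmap : (init.foldl pvStep []).map Prod.fst = r₀.map Prod.fst ++ [k] := by
        rw [hr]; simp
      by_cases hkveq : k = v
      · -- increment branch: v equals the last run's key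
        have hknotr₀ : k ∉ r₀.map Prod.fst := by
          have h2 : (r₀.map Prod.fst ++ [k]).Nodup := holdmap ▸ hnd
          rcases List.nodup_append.mp h2 with ⟨_, _, hdisj⟩
          exact fun hm => hdisj k hm k (by simp) rfl
        have hnewmap : ((init ++ [v]).foldl pvStep []).map Prod.fst = r₀.map Prod.fst ++ [v] := by
          rw [hfold, hstep, if_pos hkveq]; simp
        have hveqmap : r₀.map Prod.fst ++ [v] = (init.foldl pvStep []).map Prod.fst := by
          rw [holdmap, hkveq]
      
        refine ⟨by rw [hnewmap, hveqmap]; exact hnd, ?_, ?_, ?_⟩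
        · intro k'
          rw [hnewmap, hveqmap, hmem]
          constructor
          · intro h; exact List.mem_append.mpr (Or.inl h)
          · intro h
            rcases List.mem_append.mp h with h | h
            · exact h
            · simp at h; subst h; exact hkveq ▸ hk_mem
        · rw [hnewmap]; simp
        · intro c
          have hn : n = (init.count k : Int) := by
            have hgetold := hget k
            rw [hr, pvGet_append, if_neg hknotr₀] at hgetold
            simpa [pvGet] using hgetold
          rw [hfold, hstep, if_pos hkveq, pvGet_append, pv_count_snoc]
          by_cases hc : c ∈ r₀.map Prod.fst
          · have hck : ¬ k = c := fun he => hknotr₀ (he ▸ hc)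
            have hvc : ¬ v = c := fun he => hck (hkveq.trans he)
            have hgetold := hget c
            rw [hr, pvGet_append, if_pos hc] at hgetold
            rw [if_pos hc, hgetold, if_neg hvc, add_zero]
          · rw [if_neg hc]
            by_cases hck : c = k
            · subst hck
              have hvc : v = c := hkveq.symm
              simp [pvGet, hvc, ← hn]
            · have hck' : ¬ k = c := fun he => hck he.symm
              have hvc : ¬ v = c := fun he => hck' (hkveq.trans he)
              have hcnot : c ∉ init := by
                intro hcm
                have : c ∈ (init.foldl pvStep []).map Prod.fst := (hmem c).mpr hcm
                rw [holdmap] at this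
                rcases List.mem_append.mp this with h | h
                · exact hc h
                · simp at h; exact hck h
              have : init.count c = 0 := List.count_eq_zero.mpr hcnot
              simp [pvGet, hvc, this]
      · -- new-run branch: v starts a fresh run; v cannot occur in init
        have hvnot : v ∉ init := by
          intro hv
          have hvl : v ≤ init.getLast hinit_ne := pv_le_getLast init hinit v hv hinit_ne
          rw [hlk] at hvl
          exact hkveq (le_antisymm hkv hvl)
        have hvnotkeys : v ∉ (init.foldl pvStep []).map Prod.fst := fun h => hvnot ((hmem v).mp h)
        have hnewmap : ((init ++ [v]).foldl pvStep []).map Prod.fst =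
            (init.foldl pvStep []).map Prod.fst ++ [v] := by
          rw [hfold, hstep, if_neg hkveq]; simp
        refine ⟨?_, ?_, ?_, ?_⟩
        · rw [hnewmap, List.nodup_append]
          refine ⟨hnd, List.nodup_singleton v, ?_⟩
          intro a ha b hb
          simp at hb; subst hb
          exact fun he => hvnotkeys (he ▸ ha)
        · intro k'
          rw [hnewmap]
          simp only [List.mem_append, hmem, List.mem_singleton]
        · rw [hnewmap]; simp
        · intro c
          rw [hfold, hstep, if_neg hkveq, pvGet_append, pv_count_snoc]
          by_cases hc : c ∈ (init.foldl pvStep []).map Prod.fst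
          · have hcv : ¬ v = c := fun he => hvnotkeys (he ▸ hc)
            rw [if_pos hc, hget c, if_neg hcv, add_zero]
          · have hcnot : c ∉ init := fun h => hc ((hmem c).mpr h)
            have hcz : init.count c = 0 := List.count_eq_zero.mpr hcnot
            rw [if_neg hc, hcz]
            by_cases hvc : v = c
            · subst hvc; simp [pvGet]
            · have hvc' : ¬ c = v := fun he => hvc he.symm
              simp [pvGet, hvc]

-- B's lookup in the run list of the sorted input is the count in the input
theorem pv_get_count (value : List Int) (c : Int) :
    pvGet ((PySem.List.sorted value (fun x => x) false).foldl pvStep []) c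
      = (value.count c : Int) := by
  have hp : (PySem.List.sorted value (fun x => x) false).Pairwise (· ≤ ·) := by
    have := PySem.List.sorted_pairwise value (fun x => x)
    simpa using this
  obtain ⟨_, _, _, hget⟩ := pv_rle_inv _ hp
  rw [hget c, (PySem.List.sorted_perm value (fun x => x) false).count_eq]

-- ===== VERDICT (by name: the statement is the Claim_ definition above) =====
theorem find_emo_count_spec : Claim_equal_find_emo_count := by
  intro value _
  unfold Spec_find_emo_count find_emo_count find_emo_count_alt
  have hperm := PySem.List.sorted_perm (PySem.Dict.counter value).items (fun p : Int × Int => p.2) true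
  rw [pv_decomp]
  rw [pv_slot_count value _ hperm (-1), pv_slot_count value _ hperm 0,
    pv_slot_count value _ hperm 1, pv_slot_count value _ hperm 2,
    pv_slot_count value _ hperm 3, pv_slot_count value _ hperm 4,
    pv_slot_count value _ hperm 5]
  simp only [pv_get_count]
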